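-- pv_equiv track=rewrite | github.com/JosipDomazetDev/AST_mars | TwilightRuleApplier.py | apply_twilight_rule
-- ===== SOURCE A (Python) =====
-- def apply_twilight_rule(overlap: int, intervals1: list, intervals2: list) -> int:
--     """
--     Applies the Twilight Rule when intervals share only a single point.
--     """
--     if overlap > 0:
--         return overlap
--
--     # Check for single-point overlaps
--     points1 = {interval[0] for interval in intervals1} | {interval[1] for interval in intervals1}
--     points2 = {interval[0] for interval in intervals2} | {interval[1] for interval in intervals2}
--     common_points = points1 & points2
--
--     if common_points:
--         return 1  # Twilight Rule applies
--
--     return 0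
-- ===== SOURCE B (Python) =====
-- def apply_twilight_rule(overlap: int, intervals1: list, intervals2: list) -> int:
--     """
--     Applies the Twilight Rule when intervals share only a single point.
--     """
--     if overlap > 0:
--         return overlap
--     # Direct pairwise endpoint comparison, no auxiliary sets.
--     for a, b in intervals1:
--         for c, d in intervals2:
--             if a == c or a == d or b == c or b == d:
--                 return 1
--     return 0
-- ===== Notes on version B (the rewrite author's own statement) =====
-- stated objective: alternative
-- what changed: Replaces building two endpoint sets and intersecting them with a direct nested scan over interval pairs that returns 1 on the first shared endpoint.
import Mathlib
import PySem

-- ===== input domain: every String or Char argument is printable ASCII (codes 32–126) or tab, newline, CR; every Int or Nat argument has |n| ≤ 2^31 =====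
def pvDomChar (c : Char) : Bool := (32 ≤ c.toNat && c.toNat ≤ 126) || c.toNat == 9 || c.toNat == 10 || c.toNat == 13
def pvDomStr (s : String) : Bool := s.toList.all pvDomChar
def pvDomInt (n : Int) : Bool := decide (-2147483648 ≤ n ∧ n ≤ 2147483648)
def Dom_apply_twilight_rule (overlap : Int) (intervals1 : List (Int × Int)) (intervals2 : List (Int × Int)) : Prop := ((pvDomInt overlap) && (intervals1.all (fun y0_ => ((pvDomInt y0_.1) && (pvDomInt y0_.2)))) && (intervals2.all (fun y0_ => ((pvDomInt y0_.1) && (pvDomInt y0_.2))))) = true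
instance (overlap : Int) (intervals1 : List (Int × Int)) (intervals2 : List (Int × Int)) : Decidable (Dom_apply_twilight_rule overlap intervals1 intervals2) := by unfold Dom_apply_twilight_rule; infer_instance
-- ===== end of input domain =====

-- B replaces the endpoint-set intersection with a direct nested scan over interval
-- pairs returning 1 on the first shared endpoint (alternative decomposition, not faster).

-- ===== PORT A =====
def apply_twilight_rule (overlap : Int) (intervals1 : List (Int × Int)) (intervals2 : List (Int × Int)) : Int :=
  if overlap > 0 then overlap
  else
    let points1 : PySem.Set Int :=
      PySem.Set.union (PySem.Set.ofList (intervals1.map (·.1))) (PySem.Set.ofList (intervals1.map (·.2)))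
    let points2 : PySem.Set Int :=
      PySem.Set.union (PySem.Set.ofList (intervals2.map (·.1))) (PySem.Set.ofList (intervals2.map (·.2)))
    let common_points := PySem.Set.inter points1 points2
    if common_points ≠ [] then 1 else 0

-- ===== PORT B =====
-- inner loop: does (a, b) share an endpoint with some interval of l?
def twilightInner (a b : Int) : List (Int × Int) → Bool
  | [] => false
  | (c, d) :: rest =>
    if a = c || a = d || b = c || b = d then true else twilightInner a b rest

-- outer loop over intervals1
def twilightOuter (intervals2 : List (Int × Int)) : List (Int × Int) → Bool
  | [] => false
  | (a, b) :: rest =>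
    if twilightInner a b intervals2 then true else twilightOuter intervals2 rest

def apply_twilight_rule_alt (overlap : Int) (intervals1 : List (Int × Int)) (intervals2 : List (Int × Int)) : Int :=
  if overlap > 0 then overlap
  else if twilightOuter intervals2 intervals1 then 1 else 0

-- ===== PRECONDITION & SPEC =====
def Spec_apply_twilight_rule (overlap : Int) (intervals1 : List (Int × Int)) (intervals2 : List (Int × Int)) (out : Int) : Prop := out = apply_twilight_rule_alt overlap intervals1 intervals2
instance (overlap : Int) (intervals1 : List (Int × Int)) (intervals2 : List (Int × Int)) (out : Int) : Decidable (Spec_apply_twilight_rule overlap intervals1 intervals2 out) := by unfold Spec_apply_twilight_rule; infer_instance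

-- ===== CLAIM (what is proved, stated in full; the proofs are below) =====
def Claim_equal_apply_twilight_rule : Prop := ∀ (overlap : Int) (intervals1 : List (Int × Int)) (intervals2 : List (Int × Int)), Dom_apply_twilight_rule overlap intervals1 intervals2 → Spec_apply_twilight_rule overlap intervals1 intervals2 (apply_twilight_rule overlap intervals1 intervals2)

-- ===== LEMMAS AND PROOFS =====

lemma twilightInner_iff (a b : Int) (l : List (Int × Int)) :
    twilightInner a b l = true ↔ ∃ p ∈ l, a = p.1 ∨ a = p.2 ∨ b = p.1 ∨ b = p.2 := by
  induction l with
  | nil => simp [twilightInner]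
  | cons p rest ih =>
    obtain ⟨c, d⟩ := p
    simp only [twilightInner, List.mem_cons]
    split
    next h =>
      simp only [Bool.or_eq_true, decide_eq_true_eq] at h
      constructor
      · intro _; exact ⟨(c, d), Or.inl rfl, by tauto⟩
      · intro _; rfl
    next h =>
      simp only [Bool.or_eq_true, decide_eq_true_eq, not_or] at h
      rw [ih]
      constructor
      · rintro ⟨r, hr, hc⟩; exact ⟨r, Or.inr hr, hc⟩
      · rintro ⟨r, rfl | hr, hc⟩
        · simp only at hc; tauto
        · exact ⟨r, hr, hc⟩

lemma twilightOuter_iff (l2 l1 : List (Int × Int)) :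
    twilightOuter l2 l1 = true ↔ ∃ p ∈ l1, twilightInner p.1 p.2 l2 = true := by
  induction l1 with
  | nil => simp [twilightOuter]
  | cons p rest ih =>
    obtain ⟨a, b⟩ := p
    by_cases h : twilightInner a b l2 = true
    · simp [twilightOuter, h]
    · simp [twilightOuter, h, ih]

-- A's common_points is nonempty exactly when B's nested scan finds a shared endpoint.
lemma common_iff (l1 l2 : List (Int × Int)) :
    (PySem.Set.inter
       (PySem.Set.union (PySem.Set.ofList (l1.map (·.1))) (PySem.Set.ofList (l1.map (·.2))))
       (PySem.Set.union (PySem.Set.ofList (l2.map (·.1))) (PySem.Set.ofList (l2.map (·.2)))) ≠ [])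
    ↔ twilightOuter l2 l1 = true := by
  rw [twilightOuter_iff]
  constructor
  · intro h
    obtain ⟨x, hx⟩ := List.exists_mem_of_ne_nil _ h
    rw [PySem.Set.mem_inter] at hx
    obtain ⟨h1, h2⟩ := hx
    rw [PySem.Set.mem_union, PySem.Set.mem_ofList, PySem.Set.mem_ofList] at h1 h2
    have h1' : ∃ p ∈ l1, x = p.1 ∨ x = p.2 := by
      rcases h1 with h | h <;> simp only [List.mem_map] at h <;>
        obtain ⟨p, hp, he⟩ := h <;> exact ⟨p, hp, by tauto⟩
    obtain ⟨p, hp, hpe⟩ := h1'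
    refine ⟨p, hp, ?_⟩
    rw [twilightInner_iff]
    have h2' : ∃ q ∈ l2, x = q.1 ∨ x = q.2 := by
      rcases h2 with h | h <;> simp only [List.mem_map] at h <;>
        obtain ⟨q, hq, he⟩ := h <;> exact ⟨q, hq, by tauto⟩
    obtain ⟨q, hq, hqe⟩ := h2'
    exact ⟨q, hq, by rcases hpe with rfl | rfl <;> rcases hqe with h | h <;> tauto⟩
  · rintro ⟨p, hp, hi⟩
    rw [twilightInner_iff] at hi
    obtain ⟨q, hq, hcase⟩ := hi
    have mem1 : ∀ x, (x = p.1 ∨ x = p.2) →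
        x ∈ PySem.Set.union (PySem.Set.ofList (l1.map (·.1))) (PySem.Set.ofList (l1.map (·.2))) := by
      intro x hx
      rw [PySem.Set.mem_union, PySem.Set.mem_ofList, PySem.Set.mem_ofList]
      rcases hx with rfl | rfl
      · exact Or.inl (List.mem_map_of_mem hp)
      · exact Or.inr (List.mem_map_of_mem hp)
    have mem2 : ∀ x, (x = q.1 ∨ x = q.2) →
        x ∈ PySem.Set.union (PySem.Set.ofList (l2.map (·.1))) (PySem.Set.ofList (l2.map (·.2))) := by
      intro x hx
      rw [PySem.Set.mem_union, PySem.Set.mem_ofList, PySem.Set.mem_ofList]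
      rcases hx with rfl | rfl
      · exact Or.inl (List.mem_map_of_mem hq)
      · exact Or.inr (List.mem_map_of_mem hq)
    obtain ⟨x, hx1, hx2⟩ : ∃ x, (x = p.1 ∨ x = p.2) ∧ (x = q.1 ∨ x = q.2) := by
      rcases hcase with h | h | h | h
      · exact ⟨p.1, Or.inl rfl, Or.inl h⟩
      · exact ⟨p.1, Or.inl rfl, Or.inr h⟩
      · exact ⟨p.2, Or.inr rfl, Or.inl h⟩
      · exact ⟨p.2, Or.inr rfl, Or.inr h⟩
    apply List.ne_nil_of_mem (a := x)
    rw [PySem.Set.mem_inter]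
    exact ⟨mem1 x hx1, mem2 x hx2⟩

-- ===== VERDICT (by name: the statement is the Claim_ definition above) =====
theorem apply_twilight_rule_spec : Claim_equal_apply_twilight_rule := by
  intro overlap l1 l2 _
  unfold Spec_apply_twilight_rule apply_twilight_rule apply_twilight_rule_alt
  by_cases h : overlap > 0
  · simp [h]
  · simp only [h, if_false]
    by_cases hc : twilightOuter l2 l1 = true
    · rw [if_pos ((common_iff l1 l2).mpr hc), if_pos hc]
    · rw [if_neg (fun hne => hc ((common_iff l1 l2).mp hne)),
        if_neg (by simpa using hc)]
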